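-- pv_equiv track=rewrite | github.com/hyer0705/Algorithm_Study | Seori/Programmers/행렬과 연산.py | solution
-- ===== SOURCE A (Python) =====
-- from collections import deque
--
-- def solution(rc, operations):
--
--     # 행렬의 네 모서리 값을 각각 deque에서 회전하도록 하는 함수
--     def Rotate():
--         rows[height - 1].append(outer_columns[1].pop())
--         outer_columns[0].append(rows[height - 1].popleft())
--         rows[0].appendleft(outer_columns[0].popleft())
--         outer_columns[1].appendleft(rows[0].pop())
--
--     # 행렬의 가장 마지막 행이 맨 위로 오도록 deque에서 처리해주는 함수
--     def ShiftRow():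
--         rows.appendleft(rows.pop())
--         outer_columns[0].appendleft(outer_columns[0].pop())
--         outer_columns[1].appendleft(outer_columns[1].pop())
--
--     # 효율성을 위해서 각 행을, 그리고 처음과 끝 열을 deque로 변환
--     height, width = len(rc), len(rc[0])
--     rows = deque(deque(row[1:-1]) for row in rc)
--     outer_columns = [deque(rc[h][0] for h in range(height)), deque(rc[h][width - 1] for h in range(height))]
--
--     for operation in operations:
--         if operation == 'Rotate':
--             Rotate()
--         elif operation == 'ShiftRow':
--             ShiftRow()
--
--     # 결과값을 행렬 형태로 반환
--     answer = []
--     for h in range(height):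
--         answer.append([])
--         answer[h].append(outer_columns[0][h])
--         answer[h].extend(rows[h])
--         answer[h].append(outer_columns[1][h])
--
--     return answer
-- ===== SOURCE B (Python) =====
-- def _rotate_border(m):
--     # rotate the outer border of the matrix one step clockwise
--     if len(m) == 1:
--         return [m[0][-1:] + m[0][:-1]]
--     mids = [[below[0]] + row[1:-1] + [above[-1]]
--             for above, row, below in zip(m, m[1:], m[2:])]
--     top = [m[1][0]] + m[0][:-1]
--     bottom = m[-1][1:] + [m[-2][-1]]
--     return [top] + mids + [bottom]
--
-- def solution(rc, operations):
--     # rows rebuilt as first cell + interior + last cell (so the border is explicit)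
--     m = [[row[0]] + row[1:-1] + [row[-1]] for row in rc]
--     for op in operations:
--         if op == 'ShiftRow':
--             m = m[-1:] + m[:-1]
--         elif op == 'Rotate':
--             m = _rotate_border(m)
--     return m
-- ===== Notes on version B (the rewrite author's own statement) =====
-- stated objective: simpler
-- what changed: B keeps the whole matrix as a plain list of rows and performs ShiftRow by moving the last row to the front and Rotate by rebuilding the rows functionally along the clockwise border walk, instead of A's mutable deque split into per-row interiors plus two outer-column deques.
-- outside the precondition, e.g. on solution([[1, 2], [3, 4, 5]], []): A returns [[1, 2], [3, 4, 4]], B returns [[1, 2], [3, 4, 5]]; on solution([[1, 2, 3]], ['Rotate']): A returns [[2, 1, 3]], B returns [[3, 1, 2]]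
import Mathlib
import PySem

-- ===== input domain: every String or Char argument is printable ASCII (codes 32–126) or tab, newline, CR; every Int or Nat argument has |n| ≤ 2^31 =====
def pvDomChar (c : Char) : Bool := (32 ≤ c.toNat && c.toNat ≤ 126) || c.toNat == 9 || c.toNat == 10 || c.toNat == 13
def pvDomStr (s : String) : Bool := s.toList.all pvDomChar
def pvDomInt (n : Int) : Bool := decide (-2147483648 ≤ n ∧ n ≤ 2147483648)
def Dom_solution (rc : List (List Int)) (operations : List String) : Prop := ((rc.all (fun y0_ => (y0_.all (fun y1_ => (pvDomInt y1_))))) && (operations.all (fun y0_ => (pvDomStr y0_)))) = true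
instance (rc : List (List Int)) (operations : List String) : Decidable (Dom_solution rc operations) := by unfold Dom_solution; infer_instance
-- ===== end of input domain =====

-- B replaces A's three mutable deques (per-row interiors plus the two outer columns) by a plain
-- list-of-rows matrix: ShiftRow moves the last row to the front, Rotate rebuilds the rows with a
-- clockwise border walk; objective: simpler (equivalence is about the return value; neither mutates rc).

-- ===== PORT A =====
-- deque ops are exact for nonempty deques; Pre_solution keeps every pop/indexed access nonempty
def pvRotateA (height : Nat) (st : List (List Int) × List Int × List Int) :
    List (List Int) × List Int × List Int :=
  let rows := st.1; let oc0 := st.2.1; let oc1 := st.2.2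
  -- rows[height - 1].append(outer_columns[1].pop())
  let v1 := oc1.getLast!
  let oc1 := oc1.dropLast
  let rows := rows.modify (height - 1) (· ++ [v1])
  -- outer_columns[0].append(rows[height - 1].popleft())
  let v2 := (rows.getD (height - 1) []).head!
  let rows := rows.modify (height - 1) (·.tail)
  let oc0 := oc0 ++ [v2]
  -- rows[0].appendleft(outer_columns[0].popleft())
  let v3 := oc0.head!
  let oc0 := oc0.tail
  let rows := rows.modify 0 (v3 :: ·)
  -- outer_columns[1].appendleft(rows[0].pop())
  let v4 := (rows.getD 0 []).getLast!
  let rows := rows.modify 0 (·.dropLast)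
  let oc1 := v4 :: oc1
  (rows, oc0, oc1)

-- rows.appendleft(rows.pop()) on each of the three deques
def pvShiftA (st : List (List Int) × List Int × List Int) :
    List (List Int) × List Int × List Int :=
  ((st.1.getLast!) :: st.1.dropLast, st.2.1.getLast! :: st.2.1.dropLast,
   st.2.2.getLast! :: st.2.2.dropLast)

def solution (rc : List (List Int)) (operations : List String) : List (List Int) :=
  let height := rc.length
  let width := (rc.getD 0 []).length          -- len(rc[0]); rc ≠ [] under Pre_solution
  let rows := rc.map (fun row => PySem.List.slice row (some 1) (some (-1)))   -- deque(row[1:-1])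
  let oc0 := (List.range height).map (fun h => (rc.getD h []).getD 0 0)       -- rc[h][0]
  let oc1 := (List.range height).map (fun h => (rc.getD h []).getD (width - 1) 0)  -- rc[h][width-1]
  let st := operations.foldl (fun st op =>
      if op = "Rotate" then pvRotateA height st
      else if op = "ShiftRow" then pvShiftA st
      else st) (rows, oc0, oc1)
  (List.range height).foldl (fun answer h =>
      answer ++ [(st.2.1.getD h 0) :: (st.1.getD h []) ++ [st.2.2.getD h 0]]) []

-- ===== PORT B =====
-- one entry per zip(m, m[1:], m[2:]) triple: [below[0]] + row[1:-1] + [above[-1]]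
def pvMids : List (List Int) → List (List Int)
  | above :: row :: below :: rest =>
      (below.head! :: (PySem.List.slice row (some 1) (some (-1)) ++ [above.getLast!]))
        :: pvMids (row :: below :: rest)
  | _ => []

def pvRotateBorder (m : List (List Int)) : List (List Int) :=
  if m.length = 1 then
    [(m.getD 0 []).getLast! :: (m.getD 0 []).dropLast]    -- m[0][-1:] + m[0][:-1] (row nonempty under Pre_)
  else
    let mids := pvMids m
    let top := (m.getD 1 []).head! :: (m.getD 0 []).dropLast      -- [m[1][0]] + m[0][:-1]
    let bottom := (m.getLast!).tail ++ [(m.getD (m.length - 2) []).getLast!]  -- m[-1][1:] + [m[-2][-1]]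
    top :: mids ++ [bottom]

def solution_alt (rc : List (List Int)) (operations : List String) : List (List Int) :=
  let m := rc.map (fun row =>
      (row.getD 0 0) :: PySem.List.slice row (some 1) (some (-1)) ++ [row.getLast!])
  operations.foldl (fun m op =>
      if op = "ShiftRow" then (m.getLast!) :: m.dropLast    -- m[-1:] + m[:-1]
      else if op = "Rotate" then pvRotateBorder m
      else m) m

-- ===== PRECONDITION & SPEC =====
-- Pre_ = nonempty rectangular matrix (the task's natural domain: A raises IndexError on rc = [],
-- on empty rows and on rows shorter than row 0, and rows longer than row 0 are outside the
-- natural domain of this matrix puzzle), excluding also single-row matrices of width >= 3 with a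
-- 'Rotate' operation: rotating the border of a 1-row matrix is an unspecified corner (the puzzle
-- guarantees larger matrices) on which A's corner deques alias the one row and swap its first two
-- entries per Rotate, while B turns the whole row cyclically — both readings are defensible.
def Pre_solution (rc : List (List Int)) (operations : List String) : Prop :=
  rc ≠ [] ∧ (∀ row ∈ rc, row ≠ [] ∧ row.length = rc.headI.length) ∧
    ¬(rc.length = 1 ∧ 3 ≤ rc.headI.length ∧ "Rotate" ∈ operations)
instance (rc : List (List Int)) (operations : List String) : Decidable (Pre_solution rc operations) := by
  unfold Pre_solution; infer_instance
def pvWitness_solution : List (List Int) × List String := ([[1, 2], [3, 4]], ["Rotate"])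

def Spec_solution (rc : List (List Int)) (operations : List String) (out : List (List Int)) : Prop :=
  out = solution_alt rc operations
instance (rc : List (List Int)) (operations : List String) (out : List (List Int)) : Decidable (Spec_solution rc operations out) := by
  unfold Spec_solution; infer_instance

-- ===== CLAIM (what is proved, stated in full; the proofs are below) =====
def Claim_equal_solution : Prop := ∀ (rc : List (List Int)) (operations : List String), Dom_solution rc operations → Pre_solution rc operations → Spec_solution rc operations (solution rc operations)

-- ===== LEMMAS AND PROOFS =====

-- glue of A's split state back into a matrix: row h = [oc0[h]] + rows[h] + [oc1[h]]
def pvGlue : List Int → List (List Int) → List Int → List (List Int)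
  | a :: as, r :: rs, z :: zs => (a :: r ++ [z]) :: pvGlue as rs zs
  | _, _, _ => []

theorem pvSlice_one_neg_one (l : List Int) :
    PySem.List.slice l (some 1) (some (-1)) = l.tail.dropLast := by
  simp [PySem.List.slice]
  cases l with
  | nil => simp
  | cons x xs => simp [List.dropLast_eq_take]

theorem pvModify_concat (xs : List (List Int)) (y : List Int) (f : List Int → List Int) :
    (xs ++ [y]).modify xs.length f = xs ++ [f y] := by
  induction xs with
  | nil => simp [List.modify]
  | cons a as ih => simpa [List.modify] using ih

theorem pvDropLast_append_getLast! (l : List Int) (h : l ≠ []) :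
    l.dropLast ++ [l.getLast!] = l := by
  cases l with
  | nil => simp at h
  | cons a as =>
    have : (a :: as).getLast! = (a :: as).getLast (by simp) := by simp [List.getLast!]
    rw [this]; exact List.dropLast_append_getLast _

theorem pvLength_glue (a : List Int) (r : List (List Int)) (z : List Int)
    (h1 : a.length = r.length) (h2 : z.length = r.length) :
    (pvGlue a r z).length = r.length := by
  induction r generalizing a z with
  | nil => cases a <;> cases z <;> simp_all [pvGlue]
  | cons x xs ih =>
    cases a with
    | nil => simp at h1
    | cons a0 as =>
      cases z with
      | nil => simp at h2
      | cons z0 zs => simp_all [pvGlue]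

theorem pvGetElem_glue (a : List Int) (r : List (List Int)) (z : List Int)
    (h1 : a.length = r.length) (h2 : z.length = r.length)
    (i : Nat) (hi : i < r.length) (hg : i < (pvGlue a r z).length)
    (ha : i < a.length) (hz : i < z.length) :
    (pvGlue a r z)[i] = a[i] :: r[i] ++ [z[i]] := by
  induction r generalizing a z i with
  | nil => simp at hi
  | cons x xs ih =>
    cases a with
    | nil => simp at h1
    | cons a0 as =>
      cases z with
      | nil => simp at h2
      | cons z0 zs =>
        cases i with
        | zero => simp [pvGlue]
        | succ n =>
          simp only [pvGlue, List.getElem_cons_succ]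
          exact ih as zs (by simpa using h1) (by simpa using h2) n (by simpa using hi)
            (by simpa [pvGlue] using hg) (by simpa using ha) (by simpa using hz)

theorem pvGlue_map (rc : List (List Int)) (f : List Int → Int) (g : List Int → List Int)
    (k : List Int → Int) :
    pvGlue (rc.map f) (rc.map g) (rc.map k) = rc.map (fun row => f row :: g row ++ [k row]) := by
  induction rc with
  | nil => rfl
  | cons x xs ih => simp [pvGlue, ih]

theorem pvGlue_concat (a : List Int) (r : List (List Int)) (z : List Int)
    (al : Int) (rl : List Int) (zl : Int)
    (h1 : a.length = r.length) (h2 : z.length = r.length) :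
    pvGlue (a ++ [al]) (r ++ [rl]) (z ++ [zl]) = pvGlue a r z ++ [al :: rl ++ [zl]] := by
  induction r generalizing a z with
  | nil => cases a <;> cases z <;> simp_all [pvGlue]
  | cons x xs ih =>
    cases a with
    | nil => simp at h1
    | cons a0 as =>
      cases z with
      | nil => simp at h2
      | cons z0 zs => simp_all [pvGlue]

theorem pvLength_mids (m : List (List Int)) : (pvMids m).length = m.length - 2 := by
  fun_induction pvMids with
  | case1 a r b rest ih => simp only [pvMids, List.length_cons, ih]; omega
  | case2 m h =>
    cases m with
    | nil => simp [pvMids]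
    | cons x xs => cases xs with
      | nil => simp [pvMids]
      | cons y ys => cases ys with
        | nil => simp [pvMids]
        | cons z zs => exact absurd rfl (h x y z zs)

theorem pvGetElem_mids (m : List (List Int)) (i : Nat) (h : i + 2 < m.length)
    (hg : i < (pvMids m).length) :
    (pvMids m)[i] =
      (m[i + 2]'h).head! ::
        ((m[i + 1]'(by omega)).tail.dropLast ++ [(m[i]'(by omega)).getLast!]) := by
  induction m generalizing i with
  | nil => simp at h
  | cons a m ih =>
    match m, h with
    | r :: b :: rest, h =>
      cases i with
      | zero => simp [pvMids, pvSlice_one_neg_one]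
      | succ n =>
        simp only [pvMids, List.getElem_cons_succ]
        exact ih n (by simpa using h) (by simpa [pvMids] using hg)

theorem pvModify_cons_concat (x : List Int) (xs : List (List Int)) (y : List Int)
    (f : List Int → List Int) :
    (x :: (xs ++ [y])).modify (xs.length + 1) f = x :: (xs ++ [f y]) := by
  simpa [List.modify] using pvModify_concat xs y f

theorem pvGetD_cons_concat (x : List Int) (xs : List (List Int)) (y : List Int) :
    (x :: (xs ++ [y])).getD (xs.length + 1) [] = y := by
  rw [List.getD_eq_getElem?_getD, show x :: (xs ++ [y]) = (x :: xs) ++ [y] from rfl,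
    List.getElem?_append_right (by simp)]
  simp

theorem pvGetLast!_cons_concat (x : Int) (l : List Int) (y : Int) :
    (x :: (l ++ [y])).getLast! = y := by
  rw [List.getLast!_eq_getLast?_getD, show x :: (l ++ [y]) = (x :: l) ++ [y] from rfl,
    List.getLast?_concat]
  rfl

theorem pvGetD_eq_getElem {α : Type} (m : List α) (k : Nat) (d : α) (h : k < m.length) :
    m.getD k d = m[k] := by
  simp [List.getD_eq_getElem?_getD, List.getElem?_eq_getElem h]

theorem pvDropLast_cons_append (x : Int) (l : List Int) (y : Int) :
    (x :: (l ++ [y])).dropLast = x :: l := by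
  rw [show x :: (l ++ [y]) = (x :: l) ++ [y] from rfl, List.dropLast_concat]

theorem pvGetLast?_cons_append (x : Int) (l : List Int) (y : Int) :
    (x :: (l ++ [y])).getLast? = some y := by
  rw [show x :: (l ++ [y]) = (x :: l) ++ [y] from rfl, List.getLast?_concat]

theorem pvDropLast_getLastD (x : Int) (l : List Int) :
    (x :: l).dropLast ++ [(x :: l).getLast?.getD 0] = x :: l := by
  simpa [List.getLast!_eq_getLast?_getD] using pvDropLast_append_getLast! (x :: l) (by simp)

theorem pvGetLast!_eq_getElem' {α : Type} [Inhabited α] (m : List α) (k : Nat) (hk : m.length = k + 1) :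
    m.getLast! = m[k]'(by omega) := by
  rw [List.getLast!_eq_getLast?_getD, List.getLast?_eq_getElem?,
    show m.length - 1 = k from by omega, List.getElem?_eq_getElem (by omega)]
  rfl

-- the four deque moves of A's Rotate, written out symbolically (h ≥ 2 shape)
theorem pvRotateA_eq (r0 rl : List Int) (rm : List (List Int)) (oc0 oc1 : List Int)
    (h0 : oc0 ≠ []) (H : Nat) (hH : H = rm.length + 2) :
    pvRotateA H (r0 :: (rm ++ [rl]), oc0, oc1) =
      ((oc0.head! :: r0).dropLast :: (rm ++ [(rl ++ [oc1.getLast!]).tail]),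
       oc0.tail ++ [(rl ++ [oc1.getLast!]).head!],
       (oc0.head! :: r0).getLast! :: oc1.dropLast) := by
  subst hH
  obtain ⟨a0, as, rfl⟩ : ∃ x xs, oc0 = x :: xs := by
    cases oc0 with
    | nil => simp at h0
    | cons x xs => exact ⟨x, xs, rfl⟩
  simp only [pvRotateA]
  have e1 : rm.length + 2 - 1 = rm.length + 1 := by omega
  rw [e1, pvModify_cons_concat, pvGetD_cons_concat, pvModify_cons_concat]
  simp [List.modify]

theorem pvRotate_glue (oc0 oc1 : List Int) (rows : List (List Int))
    (h2 : 2 ≤ rows.length) (ha : oc0.length = rows.length) (hz : oc1.length = rows.length) :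
    pvGlue (pvRotateA rows.length (rows, oc0, oc1)).2.1 (pvRotateA rows.length (rows, oc0, oc1)).1
        (pvRotateA rows.length (rows, oc0, oc1)).2.2 =
      pvRotateBorder (pvGlue oc0 rows oc1) := by
  obtain ⟨r0, t, rfl⟩ : ∃ x xs, rows = x :: xs := by
    cases rows with
    | nil => simp at h2
    | cons x xs => exact ⟨x, xs, rfl⟩
  obtain ⟨rm, rl, rfl⟩ : ∃ xs y, t = xs ++ [y] := by
    rcases t.eq_nil_or_concat with h | ⟨xs, y, h⟩
    · subst h; simp at h2
    · exact ⟨xs, y, by simpa using h⟩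
  obtain ⟨a0, as, rfl⟩ : ∃ x xs, oc0 = x :: xs := by
    cases oc0 with
    | nil => simp at ha
    | cons x xs => exact ⟨x, xs, rfl⟩
  obtain ⟨zd, zl, rfl⟩ : ∃ xs y, oc1 = xs ++ [y] := by
    rcases oc1.eq_nil_or_concat with h | ⟨xs, y, h⟩
    · subst h; simp at hz
    · exact ⟨xs, y, by simpa using h⟩
  have has : as.length = rm.length + 1 := by simp at ha; omega
  have hzd : zd.length = rm.length + 1 := by simp at hz; omega
  rw [pvRotateA_eq r0 rl rm _ _ (by simp) _ (by simp)]
  simp only [List.head!_cons, List.tail_cons, pvGetLast!_cons_concat,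
    List.dropLast_concat, show ∀ y : Int, (zd ++ [y]).getLast! = y from fun y => by simp]
  have hMlen : (pvGlue (a0 :: as) (r0 :: (rm ++ [rl])) (zd ++ [zl])).length = rm.length + 2 := by
    rw [pvLength_glue] <;> simp [has, hzd]
  have hMget : ∀ j (hj : j < rm.length + 2),
      (pvGlue (a0 :: as) (r0 :: (rm ++ [rl])) (zd ++ [zl]))[j]'(by rw [hMlen]; omega) =
        ((a0 :: as)[j]'(by simp [has]; omega) :: (r0 :: (rm ++ [rl]))[j]'(by simp; omega)
          ++ [(zd ++ [zl])[j]'(by simp [hzd]; omega)]) := by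
    intro j hj
    exact pvGetElem_glue _ _ _ (by simp [has]) (by simp [hzd]) j (by simp; omega)
      (by rw [hMlen]; omega) (by simp [has]; omega) (by simp [hzd]; omega)
  simp only [pvRotateBorder, hMlen]
  rw [if_neg (by omega)]
  apply List.ext_getElem
  · rw [pvLength_glue] <;> simp [has, hzd, pvLength_mids, hMlen]
  intro i hL hR
  have hi : i < rm.length + 2 := by
    rw [pvLength_glue _ _ _ (by simp [has]) (by simp [hzd])] at hL
    simp at hL; omega
  rw [pvGetElem_glue _ _ _ (by simp [has]) (by simp [hzd]) i
      (by simp; omega) hL (by simp [has]; omega) (by simp; omega)]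
  have hmidlen : (pvMids (pvGlue (a0 :: as) (r0 :: (rm ++ [rl])) (zd ++ [zl]))).length
      = rm.length := by rw [pvLength_mids, hMlen]; omega
  rcases Nat.eq_zero_or_pos i with hi0 | hipos
  · -- first row
    subst hi0
    rw [pvGetD_eq_getElem _ 1 _ (by omega), pvGetD_eq_getElem _ 0 _ (by omega),
      hMget 1 (by omega), hMget 0 (by omega)]
    simp [has, hzd, List.getElem_append_left, pvDropLast_cons_append,
      pvGetLast?_cons_append, pvDropLast_getLastD]
  rcases Nat.lt_or_ge i (rm.length + 1) with himid | hilast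
  · -- middle rows: i = k + 1, k < rm.length
    obtain ⟨k, rfl⟩ : ∃ k, i = k + 1 := ⟨i - 1, by omega⟩
    have hk : k < rm.length := by omega
    have hRmid : ((((pvGlue (a0 :: as) (r0 :: (rm ++ [rl])) (zd ++ [zl])).getD 1 []).head! ::
          ((pvGlue (a0 :: as) (r0 :: (rm ++ [rl])) (zd ++ [zl])).getD 0 []).dropLast) ::
          pvMids (pvGlue (a0 :: as) (r0 :: (rm ++ [rl])) (zd ++ [zl])) ++
          [(pvGlue (a0 :: as) (r0 :: (rm ++ [rl])) (zd ++ [zl])).getLast!.tail ++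
            [((pvGlue (a0 :: as) (r0 :: (rm ++ [rl])) (zd ++ [zl])).getD (rm.length + 2 - 2) []).getLast!]])[k + 1]'hR
        = (pvMids (pvGlue (a0 :: as) (r0 :: (rm ++ [rl])) (zd ++ [zl])))[k]'(by omega) := by
      rw [List.getElem_append_left (by simp [hmidlen]; omega), List.getElem_cons_succ]
    rw [hRmid, pvGetElem_mids _ k (by omega) (by omega),
      hMget k (by omega), hMget (k + 1) (by omega), hMget (k + 2) (by omega)]
    simp [has, hzd, hk, List.getElem_append_left, pvDropLast_cons_append,
      pvGetLast?_cons_append, pvDropLast_getLastD]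
    rw [List.getElem_append_left (by omega)]
  · -- last row
    have hieq : i = rm.length + 1 := by omega
    subst hieq
    have hRlast : ((((pvGlue (a0 :: as) (r0 :: (rm ++ [rl])) (zd ++ [zl])).getD 1 []).head! ::
          ((pvGlue (a0 :: as) (r0 :: (rm ++ [rl])) (zd ++ [zl])).getD 0 []).dropLast) ::
          pvMids (pvGlue (a0 :: as) (r0 :: (rm ++ [rl])) (zd ++ [zl])) ++
          [(pvGlue (a0 :: as) (r0 :: (rm ++ [rl])) (zd ++ [zl])).getLast!.tail ++
            [((pvGlue (a0 :: as) (r0 :: (rm ++ [rl])) (zd ++ [zl])).getD (rm.length + 2 - 2) []).getLast!]])[rm.length + 1]'hR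
        = (pvGlue (a0 :: as) (r0 :: (rm ++ [rl])) (zd ++ [zl])).getLast!.tail ++
            [((pvGlue (a0 :: as) (r0 :: (rm ++ [rl])) (zd ++ [zl])).getD (rm.length + 2 - 2) []).getLast!] := by
      rw [List.getElem_append_right (by simp only [List.length_cons, hmidlen]; omega)]
      simp [hmidlen]
    have hgl : (pvGlue (a0 :: as) (r0 :: (rm ++ [rl])) (zd ++ [zl])).getLast!
        = (pvGlue (a0 :: as) (r0 :: (rm ++ [rl])) (zd ++ [zl]))[rm.length + 1]'(by omega) := by
      rw [pvGetLast!_eq_getElem' _ (rm.length + 1) hMlen]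
    rw [hRlast, hgl, hMget (rm.length + 1) (by omega),
      show rm.length + 2 - 2 = rm.length from by omega,
      pvGetD_eq_getElem _ rm.length _ (by omega), hMget rm.length (by omega)]
    have hne : rl ++ [zl] ≠ [] := by simp
    simp [has, hzd, List.getElem_append_left, List.getElem_concat_length,
      pvDropLast_cons_append, pvGetLast?_cons_append]
    rw [show ((rl ++ [zl]).head! :: ((rl ++ [zl]).tail ++ [zd[rm.length]'(by omega)]))
        = ((rl ++ [zl]).head! :: (rl ++ [zl]).tail) ++ [zd[rm.length]'(by omega)] from rfl,
      List.cons_head!_tail hne]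
    simp

theorem pvShift_glue (oc0 oc1 : List Int) (rows : List (List Int))
    (h1 : 1 ≤ rows.length) (ha : oc0.length = rows.length) (hz : oc1.length = rows.length) :
    pvGlue (pvShiftA (rows, oc0, oc1)).2.1 (pvShiftA (rows, oc0, oc1)).1
        (pvShiftA (rows, oc0, oc1)).2.2 =
      (pvGlue oc0 rows oc1).getLast! :: (pvGlue oc0 rows oc1).dropLast := by
  obtain ⟨rs, rl, rfl⟩ : ∃ xs y, rows = xs ++ [y] := by
    rcases rows.eq_nil_or_concat with h | ⟨xs, y, h⟩
    · subst h; simp at h1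
    · exact ⟨xs, y, by simpa using h⟩
  obtain ⟨as, al, rfl⟩ : ∃ xs y, oc0 = xs ++ [y] := by
    rcases oc0.eq_nil_or_concat with h | ⟨xs, y, h⟩
    · subst h; simp at ha
    · exact ⟨xs, y, by simpa using h⟩
  obtain ⟨zs, zl, rfl⟩ : ∃ xs y, oc1 = xs ++ [y] := by
    rcases oc1.eq_nil_or_concat with h | ⟨xs, y, h⟩
    · subst h; simp at hz
    · exact ⟨xs, y, by simpa using h⟩
  have h1' : as.length = rs.length := by simp at ha; omega
  have h2' : zs.length = rs.length := by simp at hz; omega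
  rw [pvGlue_concat _ _ _ _ _ _ h1' h2']
  simp [pvShiftA, pvGlue]

theorem pvRotate_step (rows : List (List Int)) (oc0 oc1 : List Int)
    (h2 : 2 ≤ rows.length) (ha : oc0.length = rows.length) (hz : oc1.length = rows.length) :
    (pvRotateA rows.length (rows, oc0, oc1)).1.length = rows.length ∧
    (pvRotateA rows.length (rows, oc0, oc1)).2.1.length = rows.length ∧
    (pvRotateA rows.length (rows, oc0, oc1)).2.2.length = rows.length := by
  obtain ⟨r0, t, rfl⟩ : ∃ x xs, rows = x :: xs := by
    cases rows with
    | nil => simp at h2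
    | cons x xs => exact ⟨x, xs, rfl⟩
  obtain ⟨rm, rl, rfl⟩ : ∃ xs y, t = xs ++ [y] := by
    rcases t.eq_nil_or_concat with h | ⟨xs, y, h⟩
    · subst h; simp at h2
    · exact ⟨xs, y, by simpa using h⟩
  have h0 : oc0 ≠ [] := by intro h; rw [h] at ha; simp at ha
  rw [pvRotateA_eq r0 rl rm _ _ h0 _ (by simp)]
  simp at ha hz ⊢
  omega

theorem pvLoop_ge2 (ops : List String) (H : Nat) (hH : 2 ≤ H) :
    ∀ (rows : List (List Int)) (oc0 oc1 : List Int),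
      rows.length = H → oc0.length = H → oc1.length = H →
      ((ops.foldl (fun st op => if op = "Rotate" then pvRotateA H st
          else if op = "ShiftRow" then pvShiftA st else st) (rows, oc0, oc1)).1.length = H ∧
       (ops.foldl (fun st op => if op = "Rotate" then pvRotateA H st
          else if op = "ShiftRow" then pvShiftA st else st) (rows, oc0, oc1)).2.1.length = H ∧
       (ops.foldl (fun st op => if op = "Rotate" then pvRotateA H st
          else if op = "ShiftRow" then pvShiftA st else st) (rows, oc0, oc1)).2.2.length = H ∧
       pvGlue (ops.foldl (fun st op => if op = "Rotate" then pvRotateA H st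
          else if op = "ShiftRow" then pvShiftA st else st) (rows, oc0, oc1)).2.1
         (ops.foldl (fun st op => if op = "Rotate" then pvRotateA H st
          else if op = "ShiftRow" then pvShiftA st else st) (rows, oc0, oc1)).1
         (ops.foldl (fun st op => if op = "Rotate" then pvRotateA H st
          else if op = "ShiftRow" then pvShiftA st else st) (rows, oc0, oc1)).2.2
         = ops.foldl (fun m op => if op = "ShiftRow" then m.getLast! :: m.dropLast
             else if op = "Rotate" then pvRotateBorder m else m) (pvGlue oc0 rows oc1)) := by
  induction ops with
  | nil => intro rows oc0 oc1 hr ha hz; exact ⟨hr, ha, hz, rfl⟩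
  | cons op ops ih =>
    intro rows oc0 oc1 hr ha hz
    simp only [List.foldl_cons]
    by_cases hrot : op = "Rotate"
    · subst hrot
      simp only [if_pos rfl, if_neg (by decide : ¬("Rotate" = "ShiftRow")), if_true]
      have hstep := pvRotate_step rows oc0 oc1 (by omega) (by omega) (by omega)
      rw [hr] at hstep
      obtain ⟨l1, l2, l3⟩ := hstep
      have hglue := pvRotate_glue oc0 oc1 rows (by omega) (by omega) (by omega)
      rw [hr] at hglue
      have e : ((pvRotateA H (rows, oc0, oc1)).1, (pvRotateA H (rows, oc0, oc1)).2.1,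
          (pvRotateA H (rows, oc0, oc1)).2.2) = pvRotateA H (rows, oc0, oc1) := rfl
      have := ih _ _ _ l1 l2 l3
      rw [e] at this
      exact ⟨this.1, this.2.1, this.2.2.1, by rw [this.2.2.2, hglue]⟩
    · by_cases hsh : op = "ShiftRow"
      · subst hsh
        simp only [if_neg (by decide : ¬("ShiftRow" = "Rotate")), if_pos rfl, if_true]
        have l1 : (pvShiftA (rows, oc0, oc1)).1.length = H := by
          simp [pvShiftA]; omega
        have l2 : (pvShiftA (rows, oc0, oc1)).2.1.length = H := by
          simp [pvShiftA]; omega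
        have l3 : (pvShiftA (rows, oc0, oc1)).2.2.length = H := by
          simp [pvShiftA]; omega
        have hglue := pvShift_glue oc0 oc1 rows (by omega) (by omega) (by omega)
        have e : ((pvShiftA (rows, oc0, oc1)).1, (pvShiftA (rows, oc0, oc1)).2.1,
            (pvShiftA (rows, oc0, oc1)).2.2) = pvShiftA (rows, oc0, oc1) := rfl
        have := ih _ _ _ l1 l2 l3
        rw [e] at this
        exact ⟨this.1, this.2.1, this.2.2.1, by rw [this.2.2.2, hglue]⟩
      · simp only [if_neg hrot, if_neg hsh]
        exact ih _ _ _ hr ha hz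

theorem pvLoop_one_small (ops : List String) :
    ∀ (a z : Int), ∃ a' z',
      (ops.foldl (fun st op => if op = "Rotate" then pvRotateA 1 st
          else if op = "ShiftRow" then pvShiftA st else st) ([[]], [a], [z]))
        = ([[]], [a'], [z']) ∧
      (ops.foldl (fun m op => if op = "ShiftRow" then m.getLast! :: m.dropLast
          else if op = "Rotate" then pvRotateBorder m else m) [[a, z]]) = [[a', z']] := by
  induction ops with
  | nil => exact fun a z => ⟨a, z, rfl, rfl⟩
  | cons op ops ih =>
    intro a z
    simp only [List.foldl_cons]
    by_cases hrot : op = "Rotate"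
    · subst hrot
      simp only [if_pos rfl, if_neg (by decide : ¬("Rotate" = "ShiftRow"))]
      have eA : pvRotateA 1 ([[]], [a], [z]) = (([[]] : List (List Int)), [z], [a]) := by
        simp [pvRotateA, List.modify]
      have eB : pvRotateBorder [[a, z]] = [[z, a]] := by
        simp [pvRotateBorder]
      rw [eA, eB]
      exact ih z a
    · by_cases hsh : op = "ShiftRow"
      · subst hsh
        simp only [if_neg (by decide : ¬("ShiftRow" = "Rotate")), if_pos rfl]
        have eA : pvShiftA ([[]], [a], [z]) = (([[]] : List (List Int)), [a], [z]) := by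
          simp [pvShiftA]
        rw [eA, show ([[a, z]].getLast! :: [[a, z]].dropLast) = [[a, z]] from by simp]
        exact ih a z
      · simp only [if_neg hrot, if_neg hsh]
        exact ih a z

theorem pvLoop_one_noRot (ops : List String) (hno : "Rotate" ∉ ops) :
    ∀ (mid : List Int) (a z : Int),
      (ops.foldl (fun st op => if op = "Rotate" then pvRotateA 1 st
          else if op = "ShiftRow" then pvShiftA st else st) ([mid], [a], [z]))
        = ([mid], [a], [z]) ∧
      (ops.foldl (fun m op => if op = "ShiftRow" then m.getLast! :: m.dropLast
          else if op = "Rotate" then pvRotateBorder m else m) [a :: mid ++ [z]])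
        = [a :: mid ++ [z]] := by
  induction ops with
  | nil => exact fun mid a z => ⟨rfl, rfl⟩
  | cons op ops ih =>
    intro mid a z
    have hop : op ≠ "Rotate" := fun h => hno (by simp [h])
    have hno' : "Rotate" ∉ ops := fun h => hno (by simp [h])
    simp only [List.foldl_cons, if_neg hop]
    by_cases hsh : op = "ShiftRow"
    · subst hsh
      simp only [if_pos rfl]
      have eA : pvShiftA ([mid], [a], [z]) = (([mid] : List (List Int)), [a], [z]) := by
        simp [pvShiftA]
      rw [eA, show (([a :: mid ++ [z]] : List (List Int)).getLast! ::
        ([a :: mid ++ [z]] : List (List Int)).dropLast) = [a :: mid ++ [z]] from by simp]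
      exact ih hno' mid a z
    · simp only [if_neg hsh]
      exact ih hno' mid a z

theorem pvMapRange_glue (a : List Int) (r : List (List Int)) (z : List Int) (n : Nat)
    (ha : a.length = n) (hr : r.length = n) (hz : z.length = n) :
    (List.range n).map (fun h => a.getD h 0 :: r.getD h [] ++ [z.getD h 0]) = pvGlue a r z := by
  apply List.ext_getElem
  · rw [pvLength_glue _ _ _ (by omega) (by omega)]
    simp [hr]
  intro i h1 h2
  have hin : i < n := by simpa using h1
  simp only [List.getElem_map, List.getElem_range]
  rw [pvGetElem_glue _ _ _ (by omega) (by omega) i (by omega) h2 (by omega) (by omega),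
    pvGetD_eq_getElem _ _ _ (by omega), pvGetD_eq_getElem _ _ _ (by omega),
    pvGetD_eq_getElem _ _ _ (by omega)]

theorem pvMapRange_getD (l : List (List Int)) (f : List Int → Int) :
    (List.range l.length).map (fun i => f (l.getD i [])) = l.map f := by
  apply List.ext_getElem
  · simp
  intro i h1 h2
  simp only [List.getElem_map, List.getElem_range]
  rw [pvGetD_eq_getElem _ _ _ (by simpa using h2)]

-- ===== VERDICT (by name: the statement is the Claim_ definition above) =====
theorem solution_spec : Claim_equal_solution := by
  intro rc ops hDom hPre
  unfold Spec_solution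
  obtain ⟨hne, hrows, hnD⟩ := hPre
  simp only [solution, solution_alt]
  have hgetD0 : rc.getD 0 [] = rc.headI := by
    cases rc with
    | nil => simp at hne
    | cons x xs => rfl
  -- A's initial outer columns as maps over rc
  have hoc0 : (List.range rc.length).map (fun h => (rc.getD h []).getD 0 0)
      = rc.map (fun row => row.getD 0 0) := pvMapRange_getD rc (fun row => row.getD 0 0)
  have hoc1 : (List.range rc.length).map (fun h => (rc.getD h []).getD ((rc.getD 0 []).length - 1) 0)
      = rc.map (fun row => row.getLast!) := by
    rw [pvMapRange_getD rc (fun row => row.getD ((rc.getD 0 []).length - 1) 0)]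
    apply List.map_congr_left
    intro row hmem
    obtain ⟨hrne, hrlen⟩ := hrows row hmem
    have hlen1 : 1 ≤ row.length := by
      cases row with
      | nil => simp at hrne
      | cons a l => simp
    rw [hgetD0, ← hrlen, pvGetD_eq_getElem _ _ _ (by omega),
      pvGetLast!_eq_getElem' row (row.length - 1) (by omega)]
  have hslice : rc.map (fun row => PySem.List.slice row (some 1) (some (-1)))
      = rc.map (fun row => row.tail.dropLast) := by
    apply List.map_congr_left
    intro row _
    exact pvSlice_one_neg_one row
  have hminit : rc.map (fun row =>
        (row.getD 0 0) :: PySem.List.slice row (some 1) (some (-1)) ++ [row.getLast!])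
      = pvGlue (rc.map (fun row => row.getD 0 0)) (rc.map (fun row => row.tail.dropLast))
          (rc.map (fun row => row.getLast!)) := by
    rw [pvGlue_map]
    apply List.map_congr_left
    intro row _
    rw [pvSlice_one_neg_one row]
  rw [hoc0, hoc1, hslice, hminit,
    PySem.List.foldl_append_singleton_eq_map]
  rcases Nat.lt_or_ge rc.length 2 with hsmall | hbig
  · -- height = 1
    obtain ⟨row, rfl⟩ : ∃ r, rc = [r] := by
      cases rc with
      | nil => simp at hne
      | cons x xs =>
        cases xs with
        | nil => exact ⟨x, rfl⟩
        | cons y ys => simp at hsmall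
    obtain ⟨hrne, _⟩ := hrows row (by simp)
    by_cases hrot : "Rotate" ∈ ops
    · -- width ≤ 2, so the interior row is empty
      have hw2 : row.length ≤ 2 := by
        by_contra hgt
        exact hnD ⟨by simp, by simp [List.headI]; omega, hrot⟩
      have hmid : row.tail.dropLast = [] := by
        apply List.eq_nil_of_length_eq_zero
        simp; omega
      simp only [List.map_cons, List.map_nil, hmid, List.length_singleton]
      obtain ⟨a', z', eA, eB⟩ := pvLoop_one_small ops (row.getD 0 0) (row.getLast!)
      have einit : pvGlue [row.getD 0 0] [[]] [row.getLast!] = [[row.getD 0 0, row.getLast!]] := by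
        simp [pvGlue]
      rw [eA, einit, eB]
      simp [List.range_succ]
    · -- no Rotate: both loops are the identity
      simp only [List.map_cons, List.map_nil, List.length_singleton]
      obtain ⟨eA, eB⟩ := pvLoop_one_noRot ops hrot (row.tail.dropLast) (row.getD 0 0) (row.getLast!)
      have einit : pvGlue [row.getD 0 0] [row.tail.dropLast] [row.getLast!]
          = [row.getD 0 0 :: row.tail.dropLast ++ [row.getLast!]] := by
        simp [pvGlue]
      rw [eA, einit, eB]
      simp [List.range_succ]
  · -- height ≥ 2
    obtain ⟨L1, L2, L3, G⟩ := pvLoop_ge2 ops rc.length hbig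
      (rc.map (fun row => row.tail.dropLast)) (rc.map (fun row => row.getD 0 0))
      (rc.map (fun row => row.getLast!)) (by simp) (by simp) (by simp)
    rw [pvMapRange_glue _ _ _ rc.length L2 L1 L3, G]
    simp
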